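-- pv_equiv track=rewrite | github.com/bifold-pathomics/PathoROB | pathorob/clustering_score/utils_clustering.py | get_2x2_combis
-- ===== SOURCE A (Python) =====
-- from itertools import combinations
--
-- def get_2x2_combis(bio_options, confounder_options):
--     """
--     Constructs all 2x2 pairings of the biological and confounder labels.
--
--     Parameters
--     ----------
--     bio_options :  bio_label_type list
--         list of all possible biological labels.
--     confounder_options :  confounder_label_type list
--         list of all possible confounder labels.
--
--     Returns
--     -------
--     combis : string set
--         set of all combinations of bio_options and confounder_options as string.
--
--     """
--     combis = set()
--     for bio1, bio2 in combinations(bio_options, r=2):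
--         for conf1, conf2 in combinations(confounder_options, r=2):
--             combis.update([f'{bio1}-{conf1}',
--                         f'{bio1}-{conf2}',
--                         f'{bio2}-{conf1}',
--                         f'{bio2}-{conf2}'])
--     return combis
-- ===== SOURCE B (Python) =====
-- def get_2x2_combis(bio_options, confounder_options):
--     """
--     Constructs all 2x2 pairings of the biological and confounder labels.
--
--     Every pairing that occurs in some 2x2 table already occurs in a table
--     anchored at the first biological label and the first confounder label,
--     so it suffices to enumerate those anchored tables: one per (other bio
--     label, other confounder label) pair.  O(B*C) instead of O(B^2*C^2).
--     """
--     combis = set()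
--     if bio_options and confounder_options:
--         bio0, conf0 = bio_options[0], confounder_options[0]
--         for bio in bio_options[1:]:
--             for conf in confounder_options[1:]:
--                 combis.update([f'{bio0}-{conf0}', f'{bio0}-{conf}',
--                                f'{bio}-{conf0}', f'{bio}-{conf}'])
--     return combis
-- ===== Notes on version B (the rewrite author's own statement) =====
-- stated objective: faster
-- what changed: Replaced the double loop over all bio-pairs x confounder-pairs by a single pass over anchored 2x2 tables (first bio label, first confounder label, one other of each), which covers every pairing exactly via O(B*C) tables instead of O(B^2*C^2).
import Mathlib
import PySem

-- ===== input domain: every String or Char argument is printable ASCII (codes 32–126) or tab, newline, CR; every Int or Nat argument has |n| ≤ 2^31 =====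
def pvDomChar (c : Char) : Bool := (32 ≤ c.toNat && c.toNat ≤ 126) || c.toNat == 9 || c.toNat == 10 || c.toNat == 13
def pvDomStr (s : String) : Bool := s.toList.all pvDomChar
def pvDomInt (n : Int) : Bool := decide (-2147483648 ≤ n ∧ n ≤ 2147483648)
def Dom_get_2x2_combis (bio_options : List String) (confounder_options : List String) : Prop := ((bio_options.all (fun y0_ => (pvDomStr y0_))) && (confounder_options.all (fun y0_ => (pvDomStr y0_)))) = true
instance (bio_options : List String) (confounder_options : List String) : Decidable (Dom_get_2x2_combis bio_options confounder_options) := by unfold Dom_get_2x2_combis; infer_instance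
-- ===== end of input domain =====

-- B replaces A's O(B^2*C^2) loop over all bio-pairs x confounder-pairs by a single
-- O(B*C) pass over the 2x2 tables anchored at the first bio and first confounder
-- label, which already contain every pairing: same returned set.

-- ===== PORT A =====
-- itertools.combinations(xs, r=2), in itertools order
def pyCombis2 {α : Type} : List α → List (α × α)
  | [] => []
  | x :: t => t.map (fun y => (x, y)) ++ pyCombis2 t

def get_2x2_combis (bio_options : List String) (confounder_options : List String) : List String :=
  (pyCombis2 bio_options).foldl (fun combis bp =>
    (pyCombis2 confounder_options).foldl (fun combis cp =>
      PySem.Set.update combis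
        [bp.1 ++ "-" ++ cp.1, bp.1 ++ "-" ++ cp.2, bp.2 ++ "-" ++ cp.1, bp.2 ++ "-" ++ cp.2])
      combis)
    PySem.Set.empty

-- ===== PORT B =====
-- 'if bio_options and confounder_options:' = both lists non-empty; bio0/conf0 are
-- the [0] elements, the loops run over the [1:] tails.
def get_2x2_combis_alt (bio_options : List String) (confounder_options : List String) : List String :=
  match bio_options, confounder_options with
  | bio0 :: _, conf0 :: _ =>
    (PySem.List.slice bio_options (some 1) none).foldl (fun combis bio =>
      (PySem.List.slice confounder_options (some 1) none).foldl (fun combis conf =>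
        PySem.Set.update combis
          [bio0 ++ "-" ++ conf0, bio0 ++ "-" ++ conf, bio ++ "-" ++ conf0, bio ++ "-" ++ conf])
        combis)
      PySem.Set.empty
  | _, _ => PySem.Set.empty

-- ===== PRECONDITION & SPEC =====
def Spec_get_2x2_combis (bio_options : List String) (confounder_options : List String) (out : List String) : Prop := out = get_2x2_combis_alt bio_options confounder_options
instance (bio_options : List String) (confounder_options : List String) (out : List String) : Decidable (Spec_get_2x2_combis bio_options confounder_options out) := by unfold Spec_get_2x2_combis; infer_instance

-- ===== CLAIM =====
def Claim_equal_get_2x2_combis : Prop := ∀ (bio_options : List String) (confounder_options : List String), Dom_get_2x2_combis bio_options confounder_options → Spec_get_2x2_combis bio_options confounder_options (get_2x2_combis bio_options confounder_options)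

-- ===== LEMMAS AND PROOFS =====

def fjoin (b c : String) : String := b ++ "-" ++ c

def quad (x y : String) (cp : String × String) : List String :=
  [fjoin x cp.1, fjoin x cp.2, fjoin y cp.1, fjoin y cp.2]

-- A's inner loop's stream of strings for one bio pair (x, y)
def streamq (conf : List String) (x y : String) : List String :=
  (pyCombis2 conf).flatMap (quad x y)

-- B's inner loop's stream for one other bio label b
def anchor (c0 : String) (ct : List String) (x y : String) : List String :=
  ct.flatMap (fun c => quad x y (c0, c))

theorem foldl_update_flatMap {α : Type} (l : List α) (h : α → List String) (s : PySem.Set String) :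
    l.foldl (fun s p => PySem.Set.update s (h p)) s = PySem.Set.update s (l.flatMap h) := by
  induction l generalizing s with
  | nil => simp [PySem.Set.update]
  | cons p t ih => simp [List.flatMap_cons, PySem.Set.update_append, ih]

theorem upd_of_forall_mem (l s : List String) (h : ∀ x ∈ l, x ∈ s) :
    PySem.Set.update s l = s := by
  induction l generalizing s with
  | nil => rfl
  | cons x t ih =>
    rw [PySem.Set.update_cons, PySem.Set.add_of_mem (h x (by simp))]
    exact ih s (fun z hz => h z (by simp [hz]))

theorem mem_pyCombis2 {α : Type} {l : List α} {p : α × α} (h : p ∈ pyCombis2 l) :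
    p.1 ∈ l ∧ p.2 ∈ l := by
  induction l with
  | nil => simp [pyCombis2] at h
  | cons x t ih =>
    simp only [pyCombis2, List.mem_append, List.mem_map] at h
    rcases h with ⟨y, hy, rfl⟩ | h
    · exact ⟨by simp, by simp [hy]⟩
    · exact ⟨by simp [(ih h).1], by simp [(ih h).2]⟩

theorem mem_streamq {conf : List String} {x y z : String} (h : z ∈ streamq conf x y) :
    ∃ c ∈ conf, z = fjoin x c ∨ z = fjoin y c := by
  simp only [streamq, List.mem_flatMap] at h
  rcases h with ⟨cp, hcp, hz⟩
  have hc := mem_pyCombis2 hcp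
  simp only [quad, List.mem_cons, List.not_mem_nil, or_false] at hz
  rcases hz with rfl | rfl | rfl | rfl
  · exact ⟨cp.1, hc.1, Or.inl rfl⟩
  · exact ⟨cp.2, hc.2, Or.inl rfl⟩
  · exact ⟨cp.1, hc.1, Or.inr rfl⟩
  · exact ⟨cp.2, hc.2, Or.inr rfl⟩

-- A's result as one big set update of its string stream
theorem get_2x2_eq_update (bio conf : List String) :
    get_2x2_combis bio conf
      = PySem.Set.update [] ((pyCombis2 bio).flatMap (fun bp => streamq conf bp.1 bp.2)) := by
  show (pyCombis2 bio).foldl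
      (fun combis bp => (pyCombis2 conf).foldl
        (fun combis cp => PySem.Set.update combis (quad bp.1 bp.2 cp)) combis) [] = _
  have hfun : (fun (combis : List String) (bp : String × String) =>
      (pyCombis2 conf).foldl
        (fun combis cp => PySem.Set.update combis (quad bp.1 bp.2 cp)) combis)
      = (fun (s : List String) (bp : String × String) =>
          PySem.Set.update s (streamq conf bp.1 bp.2)) := by
    funext s bp
    exact foldl_update_flatMap (pyCombis2 conf) (quad bp.1 bp.2) s
  rw [hfun]
  exact foldl_update_flatMap _ _ _

-- B's result as one big set update of its string stream
theorem get_2x2_alt_eq_update (b0 c0 : String) (bt ct : List String) :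
    get_2x2_combis_alt (b0 :: bt) (c0 :: ct)
      = PySem.Set.update [] (bt.flatMap (fun b => anchor c0 ct b0 b)) := by
  unfold get_2x2_combis_alt
  rw [PySem.List.slice_from_one, PySem.List.slice_from_one]
  show bt.foldl (fun combis bio =>
        ct.foldl (fun combis conf =>
          PySem.Set.update combis (quad b0 bio (c0, conf))) combis) PySem.Set.empty = _
  have hfun : (fun (combis : List String) (bio : String) =>
      ct.foldl (fun combis conf => PySem.Set.update combis (quad b0 bio (c0, conf))) combis)
      = (fun (s : List String) (bio : String) => PySem.Set.update s (anchor c0 ct b0 bio)) := by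
    funext s b
    exact foldl_update_flatMap ct (fun c => quad b0 b (c0, c)) s
  rw [hfun]
  exact foldl_update_flatMap _ _ _

-- A's inner double loop for one bio pair collapses to the anchored stream
theorem streamq_to_anchor (c0 : String) (ct : List String) (x y : String) (s : List String) :
    PySem.Set.update s (streamq (c0 :: ct) x y) = PySem.Set.update s (anchor c0 ct x y) := by
  have hexp : streamq (c0 :: ct) x y = anchor c0 ct x y ++ streamq ct x y := by
    simp [streamq, anchor, pyCombis2, List.flatMap_append, List.flatMap_map]
  rw [hexp, PySem.Set.update_append]
  apply upd_of_forall_mem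
  intro z hz
  rcases mem_streamq hz with ⟨c, hc, rfl | rfl⟩
  · rw [PySem.Set.mem_update]
    exact Or.inr (by simp only [anchor, List.mem_flatMap]; exact ⟨c, hc, by simp [quad]⟩)
  · rw [PySem.Set.mem_update]
    exact Or.inr (by simp only [anchor, List.mem_flatMap]; exact ⟨c, hc, by simp [quad]⟩)

-- the same collapse applied under a flatMap over the other bio labels
theorem flatMap_streamq_to_anchor (c0 : String) (ct : List String) (x0 : String)
    (bs : List String) : ∀ s : List String,
    PySem.Set.update s (bs.flatMap (fun b => streamq (c0 :: ct) x0 b))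
      = PySem.Set.update s (bs.flatMap (fun b => anchor c0 ct x0 b)) := by
  induction bs with
  | nil => intro s; rfl
  | cons b t ih =>
    intro s
    simp only [List.flatMap_cons]
    rw [PySem.Set.update_append, PySem.Set.update_append, streamq_to_anchor]
    exact ih _

-- every pairing of a non-first bio label is already in B's anchored stream
theorem mem_anchored (b0 c0 c1 : String) (bt cs : List String) {b c : String}
    (hb : b ∈ bt) (hc : c ∈ c0 :: c1 :: cs) :
    fjoin b c ∈ bt.flatMap (fun b => anchor c0 (c1 :: cs) b0 b) := by
  simp only [List.mem_flatMap, anchor, quad]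
  rcases (by simpa using hc : c = c0 ∨ c = c1 ∨ c ∈ cs) with rfl | rfl | hcs
  · exact ⟨b, hb, c1, by simp, by simp⟩
  · exact ⟨b, hb, c, by simp, by simp⟩
  · exact ⟨b, hb, c, by simp [hcs], by simp⟩

theorem get_2x2_combis_main (b0 c0 : String) (bt ct : List String) :
    get_2x2_combis (b0 :: bt) (c0 :: ct) = get_2x2_combis_alt (b0 :: bt) (c0 :: ct) := by
  rw [get_2x2_eq_update, get_2x2_alt_eq_update]
  have hsplit : (pyCombis2 (b0 :: bt)).flatMap (fun bp => streamq (c0 :: ct) bp.1 bp.2)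
      = bt.flatMap (fun b => streamq (c0 :: ct) b0 b)
        ++ (pyCombis2 bt).flatMap (fun bp => streamq (c0 :: ct) bp.1 bp.2) := by
    simp [pyCombis2, List.flatMap_append, List.flatMap_map]
  rw [hsplit, PySem.Set.update_append, flatMap_streamq_to_anchor]
  apply upd_of_forall_mem
  intro z hz
  rw [PySem.Set.mem_update]
  right
  simp only [List.mem_flatMap] at hz
  rcases hz with ⟨bp, hbp, hzs⟩
  have hmem := mem_pyCombis2 hbp
  rcases mem_streamq hzs with ⟨c, hc, rfl | rfl⟩
  · -- c ∈ c0 :: ct and the stream was non-empty, so ct is non-empty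
    match ct, hzs with
    | c1 :: cs, _ => exact mem_anchored b0 c0 c1 bt cs hmem.1 hc
  · match ct, hzs with
    | c1 :: cs, _ => exact mem_anchored b0 c0 c1 bt cs hmem.2 hc

-- ===== VERDICT =====
theorem get_2x2_combis_spec : Claim_equal_get_2x2_combis := by
  intro bio conf _
  unfold Spec_get_2x2_combis
  match bio, conf with
  | [], conf => simp [get_2x2_combis, get_2x2_combis_alt, pyCombis2, PySem.Set.empty]
  | b0 :: bt, [] =>
    rw [get_2x2_eq_update]
    simp [get_2x2_combis_alt, streamq, pyCombis2, PySem.Set.empty, PySem.Set.update,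
      List.flatMap, Function.comp_def]
  | b0 :: bt, c0 :: ct => exact get_2x2_combis_main b0 c0 bt ct
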